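-- pv_equiv track=rewrite | github.com/williambdean/dotfiles | tmux/capture-post.py | parse_idea
-- ===== SOURCE A (Python) =====
-- def parse_idea(raw: str) -> tuple[str, list[str]] | None:
--     if not raw.strip():
--         return None
--
--     lines = raw.splitlines()
--     while lines and not lines[0].strip():
--         lines.pop(0)
--     while lines and not lines[-1].strip():
--         lines.pop()
--     if not lines:
--         return None
--
--     idea_line = lines[0].strip()
--     summary_lines = lines[1:]
--     while summary_lines and not summary_lines[0].strip():
--         summary_lines.pop(0)
--
--     return idea_line, summary_lines
-- ===== SOURCE B (Python) =====
-- def parse_idea(raw: str) -> tuple[str, list[str]] | None: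
--     lines = raw.splitlines()
--     nb = [(i, line) for i, line in enumerate(lines) if line.strip()]
--     if not nb:
--         return None
--     idea_line = nb[0][1].strip()
--     if len(nb) == 1:
--         return idea_line, []
--     return idea_line, lines[nb[1][0]:nb[-1][0] + 1]
-- ===== Notes on version B (the rewrite author's own statement) =====
-- stated objective: alternative
-- what changed: Replaces A's three destructive pop-loops (trim leading blanks, trim trailing blanks, trim summary's leading blanks) with a single scan collecting the (index, line) pairs of non-blank lines and one slice lines[second:last+1]; the redundant raw.strip() guard disappears (empty scan result means None).
import Mathlib
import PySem

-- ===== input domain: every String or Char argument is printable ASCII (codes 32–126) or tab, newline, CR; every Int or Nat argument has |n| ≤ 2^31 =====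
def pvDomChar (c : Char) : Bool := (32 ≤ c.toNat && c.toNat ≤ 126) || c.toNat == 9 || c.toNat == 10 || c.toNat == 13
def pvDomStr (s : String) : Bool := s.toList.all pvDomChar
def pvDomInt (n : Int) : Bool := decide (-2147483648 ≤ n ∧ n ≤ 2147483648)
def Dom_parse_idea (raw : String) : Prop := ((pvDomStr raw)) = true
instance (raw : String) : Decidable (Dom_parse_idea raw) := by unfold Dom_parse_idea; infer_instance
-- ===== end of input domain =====

-- B replaces A's three destructive pop-loops by one index scan over enumerate(lines) plus a single
-- slice; equal return values are proved for every input (A only reads `raw`; neither mutates anything).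

-- ===== PORT A =====
-- `not line.strip()` (blank line test), shared by both ports
def pvBlank (s : String) : Bool := PySem.Str.strip s == ""

-- `while lines and not lines[0].strip(): lines.pop(0)` (also used for summary_lines)
def pvDropLead : List String → List String
  | [] => []
  | s :: t => if pvBlank s then pvDropLead t else s :: t

-- `while lines and not lines[-1].strip(): lines.pop()`
def pvDropTrail : List String → List String
  | [] => []
  | s :: t =>
    match pvDropTrail t with
    | [] => if pvBlank s then [] else [s]
    | r => s :: r

def parse_idea (raw : String) : Option (String × List String) :=
  if PySem.Str.strip raw == "" then none
  else
    match pvDropTrail (pvDropLead (PySem.Str.splitlines raw)) with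
    | [] => none
    | h :: t => some (PySem.Str.strip h, pvDropLead t)

-- ===== PORT B =====
-- `if line.strip()` on an (index, line) pair from enumerate
def pvNonBlank (p : Int × String) : Bool := !(PySem.Str.strip p.2 == "")

def parse_idea_alt (raw : String) : Option (String × List String) :=
  let lines := PySem.Str.splitlines raw
  match (PySem.List.enumerate lines 0).filter pvNonBlank with
  | [] => none
  | p :: rest =>
    match rest with
    | [] => some (PySem.Str.strip p.2, [])
    | q :: _ =>
        some (PySem.Str.strip p.2,
          PySem.List.slice lines (some q.1) (some ((rest.getLastD q).1 + 1)))

-- ===== PRECONDITION & SPEC =====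
def Spec_parse_idea (raw : String) (out : Option (String × List String)) : Prop := out = parse_idea_alt raw
instance (raw : String) (out : Option (String × List String)) : Decidable (Spec_parse_idea raw out) := by unfold Spec_parse_idea; infer_instance

-- ===== CLAIM (what is proved, stated in full; the proofs are below) =====
def Claim_equal_parse_idea : Prop := ∀ (raw : String), Dom_parse_idea raw → Spec_parse_idea raw (parse_idea raw)

-- ===== LEMMAS AND PROOFS =====

-- proof-side abbreviations for the two cores
def pvNb (L : List String) : List (Int × String) := (PySem.List.enumerate L 0).filter pvNonBlank

def pvShift (p : Int × String) : Int × String := (p.1 + 1, p.2)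

def pvACore (L : List String) : Option (String × List String) :=
  match pvDropTrail (pvDropLead L) with
  | [] => none
  | h :: t => some (PySem.Str.strip h, pvDropLead t)

def pvBCore (L : List String) : Option (String × List String) :=
  match pvNb L with
  | [] => none
  | p :: rest =>
    match rest with
    | [] => some (PySem.Str.strip p.2, [])
    | q :: _ =>
        some (PySem.Str.strip p.2,
          PySem.List.slice L (some q.1) (some ((rest.getLastD q).1 + 1)))

lemma alt_eq_BCore (raw : String) : parse_idea_alt raw = pvBCore (PySem.Str.splitlines raw) := rfl

-- all-whitespace invariant of splitlines.go
lemma go_space (isB : Char → Bool) :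
    ∀ (cs cur : List Char) (acc : List (List Char)),
    (∀ c ∈ cs, PySem.Chars.isspace c = true) →
    (∀ c ∈ cur, PySem.Chars.isspace c = true) →
    (∀ l ∈ acc, ∀ c ∈ l, PySem.Chars.isspace c = true) →
    ∀ l ∈ PySem.Chars.splitlines.go isB cs cur acc, ∀ c ∈ l, PySem.Chars.isspace c = true := by
  intro cs cur acc
  induction cs, cur, acc using PySem.Chars.splitlines.go.induct isB with
  | case1 cur acc h =>
    intro hcs hcur hacc
    simp only [PySem.Chars.splitlines.go, h, if_pos]
    intro l hl
    exact hacc l (List.mem_reverse.mp hl)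
  | case2 cur acc h =>
    intro hcs hcur hacc
    simp only [PySem.Chars.splitlines.go, h, Bool.false_eq_true, reduceIte]
    intro l hl
    rcases List.mem_cons.mp (List.mem_reverse.mp hl) with rfl | h2
    · intro c hc
      exact hcur c (List.mem_reverse.mp hc)
    · exact hacc l h2
  | case3 rest cur acc ih =>
    intro hcs hcur hacc
    simp only [PySem.Chars.splitlines.go]
    refine ih (fun c hc => hcs c (by simp [hc])) (by simp) ?_
    intro l hl
    rcases List.mem_cons.mp hl with rfl | hl
    · intro c hc
      exact hcur c (List.mem_reverse.mp hc)
    · exact hacc l hl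
  | case4 c rest cur acc hne hB ih =>
    intro hcs hcur hacc
    rw [PySem.Chars.splitlines.go]
    · simp only [hB, if_pos]
      refine ih (fun c hc => hcs c (by simp [hc])) (by simp) ?_
      intro l hl
      rcases List.mem_cons.mp hl with rfl | hl
      · intro c hc
        exact hcur c (List.mem_reverse.mp hc)
      · exact hacc l hl
    · exact hne
  | case5 c rest cur acc hne hB ih =>
    intro hcs hcur hacc
    rw [PySem.Chars.splitlines.go]
    · simp only [hB, Bool.false_eq_true, reduceIte]
      refine ih (fun c hc => hcs c (by simp [hc])) ?_ hacc
      intro c' hc'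
      rcases List.mem_cons.mp hc' with rfl | hc'
      · exact hcs c' (by simp)
      · exact hcur c' hc'
    · exact hne

lemma allspace_of_strip_nil (cs : List Char) (h : PySem.Chars.strip cs = []) :
    ∀ c ∈ cs, PySem.Chars.isspace c = true := by
  simp only [PySem.Chars.strip, PySem.Chars.rstrip, PySem.Chars.lstrip,
    List.reverse_eq_nil_iff, List.dropWhile_eq_nil_iff, List.mem_reverse] at h
  intro c hc
  rcases List.mem_append.mp ((List.takeWhile_append_dropWhile
      (p := PySem.Chars.isspace) (l := cs)) ▸ hc) with h1 | h2
  · exact List.mem_takeWhile_imp h1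
  · exact h c h2

lemma strip_nil_of_allspace (cs : List Char) (h : ∀ c ∈ cs, PySem.Chars.isspace c = true) :
    PySem.Chars.strip cs = [] := by
  have h1 : List.dropWhile PySem.Chars.isspace cs = [] :=
    List.dropWhile_eq_nil_iff.mpr (fun c hc => h c hc)
  simp [PySem.Chars.strip, PySem.Chars.lstrip, PySem.Chars.rstrip, h1]

lemma blank_iff (s : String) : pvBlank s = true ↔ PySem.Chars.strip s.toList = [] := by
  constructor
  · intro hb
    have : PySem.Str.strip s = "" := by simpa [pvBlank] using hb
    have := congrArg String.toList this
    simpa [PySem.Str.toList_strip] using this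
  · intro hb
    have : (PySem.Str.strip s).toList = "".toList := by simpa [PySem.Str.toList_strip] using hb
    have hs : PySem.Str.strip s = "" := by
      cases hstrip : PySem.Str.strip s
      simp_all
    simp [pvBlank, hs]

lemma blank_lines_of_strip_empty (raw : String) (h : PySem.Str.strip raw = "") :
    ∀ l ∈ PySem.Str.splitlines raw, pvBlank l = true := by
  have hs : PySem.Chars.strip raw.toList = [] := by
    have := congrArg String.toList h
    simpa [PySem.Str.toList_strip] using this
  have hall := allspace_of_strip_nil raw.toList hs
  intro l hl
  have hmem : l.toList ∈ PySem.Chars.splitlines raw.toList := by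
    rw [← PySem.Str.splitlines_map_toList]
    exact List.mem_map_of_mem hl
  have hsp : ∀ c ∈ l.toList, PySem.Chars.isspace c = true := by
    have := go_space (fun c =>
      have n := c.toNat
      decide (n = 10) || decide (n = 13) || decide (n = 11) || decide (n = 12) || decide (n = 28) ||
        decide (n = 29) || decide (n = 30) || decide (n = 133) || decide (n = 8232) ||
        decide (n = 8233)) raw.toList [] [] hall (by simp) (by simp)
    exact this l.toList (by simpa [PySem.Chars.splitlines] using hmem)
  exact (blank_iff l).mpr (strip_nil_of_allspace _ hsp)

lemma enumerate_shift {α : Type} (L : List α) (s : Int) :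
    PySem.List.enumerate L (s + 1) = (PySem.List.enumerate L s).map (fun p => (p.1 + 1, p.2)) := by
  induction L generalizing s with
  | nil => rfl
  | cons x T ih => simp [PySem.List.enumerate_cons, ih]

lemma nb_cons (x : String) (T : List String) :
    pvNb (x :: T) = (if pvBlank x then ([] : List (Int × String)) else [((0 : Int), x)])
      ++ (pvNb T).map pvShift := by
  unfold pvNb
  rw [show ((0 : Int)) = 0 from rfl, PySem.List.enumerate_cons,
    show (0 : Int) + 1 = 0 + 1 from rfl, enumerate_shift]
  rw [List.filter_cons, List.filter_map]
  have h1 : pvNonBlank ((0 : Int), x) = !pvBlank x := rfl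
  have h2 : (pvNonBlank ∘ fun p : Int × String => (p.1 + 1, p.2)) = pvNonBlank := by
    funext p; rfl
  have h3 : (fun p : Int × String => (p.1 + 1, p.2)) = pvShift := by
    funext p; rfl
  rw [h1, h2, h3]
  cases hb : pvBlank x <;> simp

lemma nb_fst_nonneg (L : List String) : ∀ p ∈ pvNb L, 0 ≤ p.1 := by
  induction L with
  | nil => intro p hp; simp [pvNb] at hp
  | cons x T ih =>
    intro p hp
    rw [nb_cons] at hp
    rcases List.mem_append.mp hp with h1 | h2
    · cases hb : pvBlank x <;> rw [hb] at h1 <;> simp_all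
    · rcases List.mem_map.mp h2 with ⟨p0, hp0, rfl⟩
      have := ih p0 hp0
      simp only [pvShift]
      omega

lemma nb_nil_iff (L : List String) : pvNb L = [] ↔ ∀ l ∈ L, pvBlank l = true := by
  induction L with
  | nil => simp [pvNb]
  | cons x T ih =>
    rw [nb_cons]
    cases hb : pvBlank x <;> simp_all

lemma dropTrail_nil_iff (L : List String) : pvDropTrail L = [] ↔ ∀ l ∈ L, pvBlank l = true := by
  induction L with
  | nil => simp [pvDropTrail]
  | cons x T ih =>
    cases hT : pvDropTrail T with
    | nil =>
      cases hb : pvBlank x <;> simp_all [pvDropTrail]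
    | cons r rs =>
      rw [show pvDropTrail (x :: T) = x :: r :: rs from by simp [pvDropTrail, hT]]
      constructor
      · intro h; simp at h
      · intro h
        have h0 := ih.mpr fun l hl => h l (by simp [hl])
        rw [hT] at h0
        simp at h0

lemma dropTrail_cons_of_ne (x : String) (T : List String) (h : pvDropTrail T ≠ []) :
    pvDropTrail (x :: T) = x :: pvDropTrail T := by
  cases hT : pvDropTrail T with
  | nil => exact absurd hT h
  | cons r rs => simp [pvDropTrail, hT]

lemma dropTrail_cons_nonblank (x : String) (T : List String) (hb : pvBlank x = false) :
    pvDropTrail (x :: T) = x :: pvDropTrail T := by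
  cases hT : pvDropTrail T with
  | nil => simp [pvDropTrail, hT, hb]
  | cons r rs => simp [pvDropTrail, hT]

lemma getLastD_map {α β : Type} (f : α → β) (l : List α) (d : α) :
    (l.map f).getLastD (f d) = f (l.getLastD d) := by
  cases l using List.reverseRecOn with
  | nil => rfl
  | append_singleton l a => simp

lemma slice_cons_succ {α : Type} (x : α) (T : List α) (j b : Int) (hj : 0 ≤ j) (hb : 0 ≤ b) :
    PySem.List.slice (x :: T) (some (j + 1)) (some (b + 1)) = PySem.List.slice T (some j) (some b) := by
  rw [PySem.List.slice_toNat _ (by omega) (by omega), PySem.List.slice_toNat _ hj hb]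
  have h1 : (j + 1).toNat = j.toNat + 1 := by omega
  have h2 : (b + 1).toNat - (j + 1).toNat = b.toNat - j.toNat := by omega
  rw [h1, List.drop_succ_cons]
  congr 1
  omega

lemma dropTrail_ne_nil_of_nb (T : List String) (p : Int × String) (rest : List (Int × String))
    (h : pvNb T = p :: rest) : pvDropTrail T ≠ [] := by
  intro hnil
  have h2 := (nb_nil_iff T).mpr ((dropTrail_nil_iff T).mp hnil)
  rw [h] at h2
  cases h2

lemma nb_last_nonneg (T : List String) (p : Int × String) (rest : List (Int × String))
    (h : pvNb T = p :: rest) : 0 ≤ (rest.getLastD p).1 := by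
  apply nb_fst_nonneg T
  rw [h]
  exact List.getLastD_mem_cons

lemma dropTrail_eq_take (L : List String) (p : Int × String) (rest : List (Int × String))
    (h : pvNb L = p :: rest) :
    pvDropTrail L = L.take ((rest.getLastD p).1.toNat + 1) := by
  induction L generalizing p rest with
  | nil => simp [pvNb] at h
  | cons x T ih =>
    rw [nb_cons] at h
    cases hb : pvBlank x
    case false =>
      rw [hb] at h
      simp only [Bool.false_eq_true, reduceIte, List.singleton_append] at h
      obtain ⟨hp, hrest⟩ := List.cons_eq_cons.mp h
      subst hp
      rw [dropTrail_cons_nonblank x T hb]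
      cases hT : pvNb T with
      | nil =>
        rw [hT] at hrest
        simp only [List.map_nil] at hrest
        subst hrest
        have hdt : pvDropTrail T = [] := (dropTrail_nil_iff T).mpr ((nb_nil_iff T).mp hT)
        simp [hdt]
      | cons p0 rest0 =>
        rw [hT, List.map_cons] at hrest
        subst hrest
        rw [List.getLastD_cons, getLastD_map]
        have hm0 := nb_last_nonneg T p0 rest0 hT
        have he : (pvShift (rest0.getLastD p0)).1.toNat + 1 = ((rest0.getLastD p0).1.toNat + 1) + 1 := by
          simp only [pvShift]; omega
        rw [he, List.take_succ_cons, ih p0 rest0 hT]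
    case true =>
      rw [hb] at h
      simp only [if_pos, List.nil_append] at h
      cases hT : pvNb T with
      | nil => rw [hT] at h; cases h
      | cons p0 rest0 =>
        rw [hT, List.map_cons] at h
        obtain ⟨hp, hrest⟩ := List.cons_eq_cons.mp h
        subst hp
        subst hrest
        rw [dropTrail_cons_of_ne x T (dropTrail_ne_nil_of_nb T p0 rest0 hT), ih p0 rest0 hT,
          getLastD_map]
        have hm0 := nb_last_nonneg T p0 rest0 hT
        have he : (pvShift (rest0.getLastD p0)).1.toNat + 1 = ((rest0.getLastD p0).1.toNat + 1) + 1 := by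
          simp only [pvShift]; omega
        rw [he, List.take_succ_cons]

lemma dropLead_dropTrail_eq (L : List String) (p : Int × String) (rest : List (Int × String))
    (h : pvNb L = p :: rest) :
    pvDropLead (pvDropTrail L) =
      (L.drop p.1.toNat).take ((rest.getLastD p).1.toNat + 1 - p.1.toNat) := by
  induction L generalizing p rest with
  | nil => simp [pvNb] at h
  | cons x T ih =>
    rw [nb_cons] at h
    cases hb : pvBlank x
    case false =>
      rw [hb] at h
      simp only [Bool.false_eq_true, reduceIte, List.singleton_append] at h
      obtain ⟨hp, hrest⟩ := List.cons_eq_cons.mp h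
      subst hp
      rw [dropTrail_cons_nonblank x T hb,
        show pvDropLead (x :: pvDropTrail T) = x :: pvDropTrail T from by simp [pvDropLead, hb]]
      cases hT : pvNb T with
      | nil =>
        rw [hT] at hrest
        simp only [List.map_nil] at hrest
        subst hrest
        have hdt : pvDropTrail T = [] := (dropTrail_nil_iff T).mpr ((nb_nil_iff T).mp hT)
        simp [hdt]
      | cons p0 rest0 =>
        rw [hT, List.map_cons] at hrest
        subst hrest
        rw [List.getLastD_cons, getLastD_map,
          show (((0 : Int), x)).1.toNat = 0 from rfl, List.drop_zero]
        have hm0 := nb_last_nonneg T p0 rest0 hT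
        have he : (pvShift (rest0.getLastD p0)).1.toNat + 1 - 0 =
            ((rest0.getLastD p0).1.toNat + 1) + 1 := by
          simp only [pvShift]; omega
        rw [he, List.take_succ_cons, dropTrail_eq_take T p0 rest0 hT]
    case true =>
      rw [hb] at h
      simp only [if_pos, List.nil_append] at h
      cases hT : pvNb T with
      | nil => rw [hT] at h; cases h
      | cons p0 rest0 =>
        rw [hT, List.map_cons] at h
        obtain ⟨hp, hrest⟩ := List.cons_eq_cons.mp h
        subst hp
        subst hrest
        rw [dropTrail_cons_of_ne x T (dropTrail_ne_nil_of_nb T p0 rest0 hT),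
          show pvDropLead (x :: pvDropTrail T) = pvDropLead (pvDropTrail T) from by
            simp [pvDropLead, hb],
          ih p0 rest0 hT, getLastD_map]
        have h0 : 0 ≤ p0.1 := nb_fst_nonneg T p0 (by rw [hT]; simp)
        have hm0 := nb_last_nonneg T p0 rest0 hT
        have e1 : (pvShift p0).1.toNat = p0.1.toNat + 1 := by simp only [pvShift]; omega
        rw [e1, List.drop_succ_cons]
        congr 1
        simp only [pvShift]
        omega

lemma core_eq (L : List String) : pvACore L = pvBCore L := by
  induction L with
  | nil => rfl
  | cons x T ih =>
    cases hb : pvBlank x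
    case true =>
      have hA : pvACore (x :: T) = pvACore T := by
        unfold pvACore
        rw [show pvDropLead (x :: T) = pvDropLead T from by simp [pvDropLead, hb]]
      rw [hA, ih]
      unfold pvBCore
      rw [nb_cons, hb]
      simp only [if_pos, List.nil_append]
      cases hT : pvNb T with
      | nil => rfl
      | cons p0 rest0 =>
        rw [List.map_cons]
        cases rest0 with
        | nil => rfl
        | cons q0 tl0 =>
          rw [List.map_cons]
          simp only [List.getLastD_cons, getLastD_map]
          have hq0 : 0 ≤ q0.1 := nb_fst_nonneg T q0 (by rw [hT]; simp)
          have hm : 0 ≤ (tl0.getLastD q0).1 :=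
            nb_fst_nonneg T _ (by rw [hT]; exact List.mem_cons_of_mem _ List.getLastD_mem_cons)
          simp only [pvShift]
          rw [slice_cons_succ x T q0.1 ((tl0.getLastD q0).1 + 1) hq0 (by omega)]
    case false =>
      unfold pvACore pvBCore
      rw [show pvDropLead (x :: T) = x :: T from by simp [pvDropLead, hb],
        dropTrail_cons_nonblank x T hb, nb_cons, hb]
      simp only [Bool.false_eq_true, reduceIte, List.singleton_append]
      cases hT : pvNb T with
      | nil =>
        rw [List.map_nil]
        have hdt : pvDropTrail T = [] := (dropTrail_nil_iff T).mpr ((nb_nil_iff T).mp hT)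
        rw [hdt]
        rfl
      | cons p0 rest0 =>
        rw [List.map_cons]
        simp only [List.getLastD_cons, getLastD_map]
        have hp0 : 0 ≤ p0.1 := nb_fst_nonneg T p0 (by rw [hT]; simp)
        have hm := nb_last_nonneg T p0 rest0 hT
        simp only [pvShift]
        rw [slice_cons_succ x T p0.1 ((rest0.getLastD p0).1 + 1) hp0 (by omega),
          PySem.List.slice_toNat T hp0 (by omega),
          dropLead_dropTrail_eq T p0 rest0 hT]
        rw [show ((rest0.getLastD p0).1 + 1).toNat = (rest0.getLastD p0).1.toNat + 1 from by omega]

-- ===== VERDICT (by name: the statement is the Claim_ definition above) =====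
theorem parse_idea_spec : Claim_equal_parse_idea := by
  intro raw _
  unfold Spec_parse_idea
  by_cases hg : PySem.Str.strip raw = ""
  · have hnb : pvNb (PySem.Str.splitlines raw) = [] :=
      (nb_nil_iff _).mpr (blank_lines_of_strip_empty raw hg)
    rw [alt_eq_BCore]
    unfold pvBCore
    rw [hnb]
    simp [parse_idea, hg]
  · have hg' : (PySem.Str.strip raw == "") = false := by simp [hg]
    rw [alt_eq_BCore, ← core_eq]
    unfold parse_idea pvACore
    rw [hg']
    simp only [Bool.false_eq_true, reduceIte]
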